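-- pv_equiv track=rewrite | github.com/MagicDrea12/daily-planner | app.py | find_start_of_day
-- ===== SOURCE A (Python) =====
-- def find_start_of_day(current_time, times):
--
--   counter = 0 # this will be the index of the task slot that the current time will be compared to
--   found = False
--
--   while found is False:
--     if counter < len(times): # this condition ensures that an object not found error does not occur
--       if current_time >= times[counter][1][0]: # if the current time is after the start time of the currently investigated task
--         counter += 1
--       else:
--         found = True
--     else:
--       found = True
--
--   counter -= 1 # goes back to the previous task slot once the comparisons fail
--
--   if counter == -1: # if the current time is before the beginning of the first task
--     start_of_day = current_time
--
--   elif current_time <= times[counter][1][1]: # if the current time is before the end of the investigated task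
--     start_of_day = times[counter][1][1] # then the start of the day should be set to the end of the task
--
--   else: # if the current time is after the end of the last task
--     start_of_day = current_time # then the start of the day is the current time
--
--   return [start_of_day, counter+1]
-- ===== SOURCE B (Python) =====
-- def find_start_of_day(current_time, times):
--     # one counting pass: on the planner's ascending-by-start slots, the slot
--     # index is simply the number of slots whose start time is <= current_time
--     idx = sum(1 for slot in times if slot[1][0] <= current_time)
--     if idx == 0:
--         return [current_time, 0]
--     end = times[idx - 1][1][1]
--     return [end if current_time <= end else current_time, idx]
-- ===== Notes on version B (the rewrite author's own statement) =====
-- stated objective: simpler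
-- what changed: Replaces A's early-exit while loop with explicit counter/found state by a single counting pass (the slot index is the number of slots whose start time is <= current_time) followed by a direct computation of the result; Pre_ requires the start times to be sorted non-decreasingly (the planner's invariant) or current_time to lie entirely below/at-or-above all start times, since the count equals A's scan index exactly there.
-- outside the precondition, e.g. on find_start_of_day(5, [(0, (10, 20)), (1, (0, 30))]): A returns [5, 0], B returns [20, 1]
import Mathlib
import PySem

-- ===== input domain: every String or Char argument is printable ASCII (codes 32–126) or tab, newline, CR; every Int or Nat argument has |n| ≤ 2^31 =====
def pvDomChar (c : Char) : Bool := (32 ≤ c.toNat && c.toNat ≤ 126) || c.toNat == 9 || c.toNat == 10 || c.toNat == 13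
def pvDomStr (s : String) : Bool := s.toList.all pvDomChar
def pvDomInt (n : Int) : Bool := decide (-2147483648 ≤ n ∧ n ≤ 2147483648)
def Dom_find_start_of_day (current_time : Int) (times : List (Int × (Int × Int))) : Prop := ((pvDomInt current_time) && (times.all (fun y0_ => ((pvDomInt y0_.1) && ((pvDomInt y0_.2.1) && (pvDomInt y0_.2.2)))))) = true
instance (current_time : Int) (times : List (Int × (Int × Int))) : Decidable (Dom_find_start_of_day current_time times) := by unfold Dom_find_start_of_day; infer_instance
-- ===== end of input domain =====

-- B replaces A's early-exit while loop with a single counting pass (idx = number of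
-- slots whose start is ≤ current_time); equality is proved on lists whose start
-- times are sorted non-decreasingly (or straddle-free), see Pre_ below.

-- ===== PORT A =====
-- A's while loop: advance counter while it is in range and current_time ≥ start of
-- the current slot. The loop walks the list left to right by index; the structural
-- recursion carries the remaining suffix (so 'counter < len(times)' = the suffix is
-- nonempty and 'times[counter]' = its head) together with the same counter state.
def fsodLoopA (current_time : Int) : List (Int × (Int × Int)) → Nat → Nat
  | [], counter => counter
  | t :: rest, counter =>
    if t.2.1 ≤ current_time then fsodLoopA current_time rest (counter + 1)
    else counter

def find_start_of_day (current_time : Int) (times : List (Int × (Int × Int))) : List Int :=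
  -- after the loop Python sets counter -= 1; we keep c = counter+1 as a Nat
  let c := fsodLoopA current_time times 0
  if c = 0 then
    -- counter == -1: current time is before the first task
    [current_time, 0]
  else
    -- Python indexes times[counter] here with 0 ≤ counter < len(times), so getD is exact
    let t := times.getD (c - 1) (0, (0, 0))
    if current_time ≤ t.2.2 then [t.2.2, (c : Int)]
    else [current_time, (c : Int)]

-- ===== PORT B =====
-- Source B: idx = sum(1 for slot in times if slot[1][0] <= current_time), ported as countP
def find_start_of_day_alt (current_time : Int) (times : List (Int × (Int × Int))) : List Int :=
  let idx := times.countP (fun slot => decide (slot.2.1 ≤ current_time))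
  if idx = 0 then [current_time, 0]
  else
    let e := (times.getD (idx - 1) (0, (0, 0))).2.2
    [if current_time ≤ e then e else current_time, (idx : Int)]

-- ===== PRECONDITION & SPEC =====
-- Pre_ excludes unsorted lists whose start times straddle current_time: there A
-- returns the slot where its scan first fails while B counts all earlier starts,
-- and on unsorted slots neither answer is canonical; the planner keeps the slots
-- sorted by start time (first disjunct; the other two disjuncts are the
-- straddle-free cases, where order cannot matter).
def Pre_find_start_of_day (current_time : Int) (times : List (Int × (Int × Int))) : Prop :=
  List.Pairwise (fun a b => a.2.1 ≤ b.2.1) times ∨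
    (∀ t ∈ times, t.2.1 ≤ current_time) ∨ (∀ t ∈ times, current_time < t.2.1)
instance (current_time : Int) (times : List (Int × (Int × Int))) : Decidable (Pre_find_start_of_day current_time times) := by unfold Pre_find_start_of_day; infer_instance

def pvWitness_find_start_of_day : Int × (List (Int × (Int × Int))) :=
  (12, [(0, (8, 10)), (1, (11, 13)), (2, (14, 16))])

def Spec_find_start_of_day (current_time : Int) (times : List (Int × (Int × Int))) (out : List Int) : Prop := out = find_start_of_day_alt current_time times
instance (current_time : Int) (times : List (Int × (Int × Int))) (out : List Int) : Decidable (Spec_find_start_of_day current_time times out) := by unfold Spec_find_start_of_day; infer_instance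

-- ===== CLAIM (what is proved, stated in full; the proofs are below) =====
def Claim_equal_find_start_of_day : Prop := ∀ (current_time : Int) (times : List (Int × (Int × Int))), Dom_find_start_of_day current_time times → Pre_find_start_of_day current_time times → Spec_find_start_of_day current_time times (find_start_of_day current_time times)

-- ===== LEMMAS AND PROOFS =====

-- A's loop adds to the counter the length of the longest prefix of starts ≤ current_time
theorem fsodLoopA_eq_takeWhile (current_time : Int) :
    ∀ (l : List (Int × (Int × Int))) (c : Nat),
      fsodLoopA current_time l c =
        c + (l.takeWhile (fun t => decide (t.2.1 ≤ current_time))).length := by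
  intro l
  induction l with
  | nil => intro c; simp [fsodLoopA]
  | cons t rest ih =>
    intro c
    by_cases h : t.2.1 ≤ current_time
    · rw [fsodLoopA, if_pos h, ih,
        List.takeWhile_cons_of_pos (by simpa using h)]
      simp; omega
    · rw [fsodLoopA, if_neg h,
        List.takeWhile_cons_of_neg (by simpa using h)]
      simp

-- on sorted starts the longest ≤-prefix has exactly as many elements as there are ≤-starts
theorem takeWhile_len_eq_countP_sorted (current_time : Int)
    (times : List (Int × (Int × Int)))
    (hs : List.Pairwise (fun a b => a.2.1 ≤ b.2.1) times) :
    (times.takeWhile (fun t => decide (t.2.1 ≤ current_time))).length =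
      times.countP (fun t => decide (t.2.1 ≤ current_time)) := by
  induction times with
  | nil => simp
  | cons x xs ih =>
    rcases List.pairwise_cons.mp hs with ⟨hx, hxs⟩
    by_cases h : x.2.1 ≤ current_time
    · rw [List.takeWhile_cons_of_pos (by simpa using h), List.countP_cons]
      simp only [h, decide_true, if_pos, List.length_cons, ih hxs]
      try omega
    · rw [List.takeWhile_cons_of_neg (by simpa using h), List.countP_cons]
      have hzero : xs.countP (fun t => decide (t.2.1 ≤ current_time)) = 0 := by
        rw [List.countP_eq_zero]
        intro a ha
        have : current_time < a.2.1 := lt_of_lt_of_le (lt_of_not_ge h) (hx a ha)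
        simpa using not_le.mpr this
      simp [h, hzero]

theorem fsod_index_eq (current_time : Int) (times : List (Int × (Int × Int)))
    (hs : Pre_find_start_of_day current_time times) :
    fsodLoopA current_time times 0 =
      times.countP (fun t => decide (t.2.1 ≤ current_time)) := by
  rw [fsodLoopA_eq_takeWhile, Nat.zero_add]
  rcases hs with hs | hs | hs
  · exact takeWhile_len_eq_countP_sorted current_time times hs
  · rw [List.takeWhile_eq_self_iff.mpr (fun a ha => by simpa using hs a ha),
      List.countP_eq_length.mpr (fun a ha => by simpa using hs a ha)]
  · have h1 : times.takeWhile (fun t => decide (t.2.1 ≤ current_time)) = [] :=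
      List.takeWhile_eq_nil_iff.mpr (fun hl => by
        simpa using not_le.mpr (hs _ (List.get_mem times ⟨0, hl⟩)))
    have h2 : times.countP (fun t => decide (t.2.1 ≤ current_time)) = 0 :=
      List.countP_eq_zero.mpr (fun a ha => by simpa using not_le.mpr (hs a ha))
    rw [h1, h2]; rfl

-- ===== VERDICT (by name: the statement is the Claim_ definition above) =====
theorem find_start_of_day_spec : Claim_equal_find_start_of_day := by
  intro current_time times _ hpre
  unfold Spec_find_start_of_day find_start_of_day find_start_of_day_alt
  rw [fsod_index_eq current_time times hpre]
  dsimp only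
  split_ifs with h1 h2 <;> rfl
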